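-- pv_equiv track=rewrite | github.com/AlexO28/leet_code_problems | global_and_local_inversions.py | isIdealPermutation
-- ===== SOURCE A (Python) =====
-- from typing import List
--
-- def isIdealPermutation(nums: List[int]) -> bool:
--     if len(nums) <= 2:
--         return True
--     max_num = nums[0]
--     for j in range(2, len(nums)):
--         if nums[j] < max_num:
--             return False
--         max_num = max(max_num, nums[j-1])
--     return True
-- ===== SOURCE B (Python) =====
-- from typing import List
--
-- def isIdealPermutation(nums: List[int]) -> bool:
--     n = len(nums)
--     for i in range(n):
--         for j in range(i + 2, n):
--             if nums[i] > nums[j]: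
--                 return False
--     return True
-- ===== Notes on version B (the rewrite author's own statement) =====
-- stated objective: alternative
-- what changed: Replaces the single running-maximum scan with a direct nested-pair search for a non-local inversion (nums[i] > nums[j] with j >= i+2).
import Mathlib
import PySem

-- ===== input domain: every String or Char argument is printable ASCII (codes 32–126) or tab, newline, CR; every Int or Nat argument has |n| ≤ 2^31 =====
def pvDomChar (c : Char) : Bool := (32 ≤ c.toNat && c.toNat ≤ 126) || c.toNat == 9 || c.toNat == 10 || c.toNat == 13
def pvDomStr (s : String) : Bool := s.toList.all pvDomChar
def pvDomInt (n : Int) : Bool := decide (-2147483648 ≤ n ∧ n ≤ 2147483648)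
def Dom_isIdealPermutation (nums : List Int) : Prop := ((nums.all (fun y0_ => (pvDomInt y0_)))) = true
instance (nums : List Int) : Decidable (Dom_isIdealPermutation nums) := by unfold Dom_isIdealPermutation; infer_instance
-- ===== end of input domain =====

-- B replaces A's running-maximum scan by a direct nested-pair search for a non-local
-- inversion (same result, genuinely different algorithm; no speed claim).


-- ===== PORT A =====
-- the 'for j in range(2, len(nums))' loop with early return, as structural recursion on j
def isIdealPermutationLoop (nums : List Int) (maxNum : Int) (j : Nat) : Bool :=
  if _h : j < nums.length then
    if nums.getD j 0 < maxNum then false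
    else isIdealPermutationLoop nums (max maxNum (nums.getD (j - 1) 0)) (j + 1)
  else true
termination_by nums.length - j

def isIdealPermutation (nums : List Int) : Bool :=
  if nums.length ≤ 2 then true
  else isIdealPermutationLoop nums (nums.getD 0 0) 2

-- ===== PORT B =====
-- nested loops over all pairs i < j with j ≥ i+2, early return False on an inversion
def isIdealPermutation_alt (nums : List Int) : Bool :=
  let n := nums.length
  (List.range n).all fun i =>
    (List.range' (i + 2) (n - (i + 2))).all fun j =>
      !(decide (nums.getD i 0 > nums.getD j 0))

-- ===== PRECONDITION & SPEC =====
def Spec_isIdealPermutation (nums : List Int) (out : Bool) : Prop := out = isIdealPermutation_alt nums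
instance (nums : List Int) (out : Bool) : Decidable (Spec_isIdealPermutation nums out) := by unfold Spec_isIdealPermutation; infer_instance

-- ===== CLAIM (what is proved, stated in full; the proofs are below) =====
def Claim_equal_isIdealPermutation : Prop := ∀ (nums : List Int), Dom_isIdealPermutation nums → Spec_isIdealPermutation nums (isIdealPermutation nums)

-- ===== LEMMAS AND PROOFS =====

-- B returns true iff there is no non-local inversion
theorem alt_iff (nums : List Int) :
    isIdealPermutation_alt nums = true ↔
      ∀ i j, i + 2 ≤ j → j < nums.length → nums.getD i 0 ≤ nums.getD j 0 := by
  simp only [isIdealPermutation_alt, List.all_eq_true, List.mem_range, List.mem_range'_1,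
    Bool.not_eq_eq_eq_not, Bool.not_true, decide_eq_false_iff_not, not_lt, gt_iff_lt]
  constructor
  · intro h i j hij hj
    exact h i (by omega) j ⟨by omega, by omega⟩
  · intro h i _ j ⟨h1, h2⟩
    exact h i j h1 (by omega)

-- invariant of A's loop: started at index j (j ≥ 1) with accumulator m, it returns true
-- iff m is ≤ every remaining element and no non-local inversion starts at index ≥ j-1
theorem loop_iff (nums : List Int) : ∀ (k : Nat) (m : Int) (j : Nat), 1 ≤ j → nums.length - j = k →
    (isIdealPermutationLoop nums m j = true ↔
      ((∀ j', j ≤ j' → j' < nums.length → m ≤ nums.getD j' 0) ∧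
       (∀ i j', j - 1 ≤ i → i + 2 ≤ j' → j' < nums.length → nums.getD i 0 ≤ nums.getD j' 0))) := by
  intro k
  induction k with
  | zero =>
    intro m j hj hk
    have hlen : ¬ (j < nums.length) := by omega
    rw [isIdealPermutationLoop, dif_neg hlen]
    constructor
    · intro _
      exact ⟨fun j' h1 h2 => absurd (by omega : j' < j) (by omega),
             fun i j' h1 h2 h3 => absurd (by omega : j' < j) (by omega)⟩
    · intro _; rfl
  | succ k ih =>
    intro m j hj hk
    have hlen : j < nums.length := by omega
    rw [isIdealPermutationLoop, dif_pos hlen]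
    by_cases hguard : nums.getD j 0 < m
    · rw [if_pos hguard]
      constructor
      · intro h; cases h
      · intro ⟨h1, _⟩
        exact absurd (h1 j le_rfl hlen) (by omega)
    · rw [if_neg hguard]
      rw [ih (max m (nums.getD (j - 1) 0)) (j + 1) (by omega) (by omega)]
      rw [not_lt] at hguard
      constructor
      · intro ⟨h1, h2⟩
        constructor
        · intro j' hj1 hj2
          rcases Nat.eq_or_lt_of_le hj1 with h | h
          · exact h ▸ hguard
          · exact le_trans (le_max_left _ _) (h1 j' h hj2)
        · intro i j' hi hij hj'
          rcases Nat.eq_or_lt_of_le hi with h | h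
          · -- i = j - 1, so j' ≥ j + 1; use the max part
            have hj' : j + 1 ≤ j' := by omega
            have := le_trans (le_max_right _ _) (h1 j' hj' ‹j' < nums.length›)
            rwa [h] at this
          · exact h2 i j' (by omega) hij hj'
      · intro ⟨h1, h2⟩
        constructor
        · intro j' hj1 hj2
          refine max_le (h1 j' (by omega) hj2) ?_
          exact h2 (j - 1) j' le_rfl (by omega) hj2
        · intro i j' hi hij hj'
          exact h2 i j' (by omega) hij hj'

-- ===== VERDICT (by name: the statement is the Claim_ definition above) =====
theorem isIdealPermutation_spec : Claim_equal_isIdealPermutation := by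
  intro nums _
  unfold Spec_isIdealPermutation isIdealPermutation
  by_cases h : nums.length ≤ 2
  · rw [if_pos h]
    symm
    rw [alt_iff]
    intro i j hij hj
    omega
  · rw [if_neg h]
    rw [not_le] at h
    rw [Bool.eq_iff_iff, alt_iff,
      loop_iff nums (nums.length - 2) (nums.getD 0 0) 2 (by omega) (by simp)]
    constructor
    · intro ⟨h1, h2⟩ i j hij hj
      match i with
      | 0 => exact h1 j hij hj
      | i + 1 => exact h2 (i + 1) j (by omega) hij hj
    · intro hall
      exact ⟨fun j' hj1 hj2 => hall 0 j' hj1 hj2,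
             fun i j' _ hij hj' => hall i j' hij hj'⟩
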